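-- pv_equiv track=rewrite | github.com/Zhipeng-Chang/CMPUT-401-Winter-2018 | Deployer/Parser/commitToDatabase.py | parsing_raw_data
-- ===== SOURCE A (Python) =====
-- def parsing_raw_data(data):
--
-- 	read = []
-- 	scan = []
-- 	cleanup = []
-- 	update = []
-- 	insert = []
-- 	read_modify_write = []
-- 	total = []
--
-- 	All = []
--
-- 	for i in data:
-- 		if "[READ]" in i:
-- 			read.append(i)
-- 		elif "[CLEANUP]" in i:
-- 			cleanup.append(i)
-- 		elif "[UPDATE]" in i:
-- 			update.append(i)
-- 		elif "[INSERT]" in i: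
-- 			insert.append(i)
-- 		elif "[SCAN]" in i:
-- 			scan.append(i)
-- 		elif "[READ-MODIFY-WRITE]" in i:
-- 			read_modify_write.append(i)
-- 		else:
-- 			total.append(i)
--
--
-- 	if len(read) != 0:
-- 		All.append(read)
-- 	if len(scan) != 0:
-- 		All.append(scan)
-- 	if len(cleanup) != 0:
-- 		All.append(cleanup)
-- 	if len(update) != 0:
-- 		All.append(update)
-- 	if len(insert) != 0:
-- 		All.append(insert)
-- 	if len(read_modify_write) != 0:
-- 		All.append(read_modify_write)
-- 	if len(total) != 0:
-- 		All.append(total)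
--
-- 	return All
-- ===== SOURCE B (Python) =====
-- TAGS = ["[READ]", "[CLEANUP]", "[UPDATE]", "[INSERT]", "[SCAN]", "[READ-MODIFY-WRITE]"]
-- OUTPUT_ORDER = ["[READ]", "[SCAN]", "[CLEANUP]", "[UPDATE]", "[INSERT]", "[READ-MODIFY-WRITE]", None]
--
-- def _classify(line):
--     for tag in TAGS:
--         if tag in line:
--             return tag
--     return None
--
-- def parsing_raw_data(data):
--     result = []
--     for key in OUTPUT_ORDER:
--         bucket = [line for line in data if _classify(line) == key]
--         if bucket:
--             result.append(bucket)
--     return result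
-- ===== Notes on version B (the rewrite author's own statement) =====
-- stated objective: idiomatic
-- what changed: Replaces the seven named accumulator lists and the elif chain with a first-match classifier over an ordered tag list plus one filter pass per output bucket, assembling non-empty buckets in a fixed output order.
import Mathlib
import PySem

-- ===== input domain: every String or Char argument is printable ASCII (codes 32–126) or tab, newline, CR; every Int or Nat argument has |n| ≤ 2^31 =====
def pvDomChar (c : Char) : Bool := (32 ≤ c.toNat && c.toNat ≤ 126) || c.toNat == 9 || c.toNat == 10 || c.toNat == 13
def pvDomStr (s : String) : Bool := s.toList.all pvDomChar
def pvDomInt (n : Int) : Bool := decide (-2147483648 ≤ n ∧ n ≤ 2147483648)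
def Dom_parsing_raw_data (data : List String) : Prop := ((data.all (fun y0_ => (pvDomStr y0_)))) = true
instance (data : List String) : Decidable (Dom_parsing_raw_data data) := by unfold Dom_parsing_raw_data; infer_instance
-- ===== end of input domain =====

-- B replaces A's seven named lists + elif chain by a first-match classifier and one filter
-- per output bucket (idiomatic restructuring; same asymptotic cost, return value identical).

-- ===== PORT A =====
-- the for-loop with its seven accumulator lists, branches in A's order
def pvLoopA (r s c u i m t : List String) : List String → (List String × List String × List String × List String × List String × List String × List String)
  | [] => (r, s, c, u, i, m, t)
  | x :: xs =>
    if PySem.Str.isIn "[READ]" x then pvLoopA (r ++ [x]) s c u i m t xs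
    else if PySem.Str.isIn "[CLEANUP]" x then pvLoopA r s (c ++ [x]) u i m t xs
    else if PySem.Str.isIn "[UPDATE]" x then pvLoopA r s c (u ++ [x]) i m t xs
    else if PySem.Str.isIn "[INSERT]" x then pvLoopA r s c u (i ++ [x]) m t xs
    else if PySem.Str.isIn "[SCAN]" x then pvLoopA r (s ++ [x]) c u i m t xs
    else if PySem.Str.isIn "[READ-MODIFY-WRITE]" x then pvLoopA r s c u i (m ++ [x]) t xs
    else pvLoopA r s c u i m (t ++ [x]) xs

def parsing_raw_data (data : List String) : List (List String) :=
  let st := pvLoopA [] [] [] [] [] [] [] data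
  let read := st.1; let scan := st.2.1; let cleanup := st.2.2.1; let update := st.2.2.2.1
  let insert := st.2.2.2.2.1; let rmw := st.2.2.2.2.2.1; let total := st.2.2.2.2.2.2
  let All : List (List String) := []
  let All := if read.length ≠ 0 then All ++ [read] else All
  let All := if scan.length ≠ 0 then All ++ [scan] else All
  let All := if cleanup.length ≠ 0 then All ++ [cleanup] else All
  let All := if update.length ≠ 0 then All ++ [update] else All
  let All := if insert.length ≠ 0 then All ++ [insert] else All
  let All := if rmw.length ≠ 0 then All ++ [rmw] else All
  let All := if total.length ≠ 0 then All ++ [total] else All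
  All

-- ===== PORT B =====
def pvTags : List String := ["[READ]", "[CLEANUP]", "[UPDATE]", "[INSERT]", "[SCAN]", "[READ-MODIFY-WRITE]"]
def pvOutputOrder : List (Option String) :=
  [some "[READ]", some "[SCAN]", some "[CLEANUP]", some "[UPDATE]", some "[INSERT]", some "[READ-MODIFY-WRITE]", none]

-- first tag (in pvTags order) that is a substring of the line, else none
def pvClassify : List String → String → Option String
  | [], _ => none
  | tag :: ts, line => if PySem.Str.isIn tag line then some tag else pvClassify ts line

def parsing_raw_data_alt (data : List String) : List (List String) :=
  pvOutputOrder.foldl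
    (fun result key =>
      let bucket := data.filter (fun line => pvClassify pvTags line == key)
      if bucket ≠ [] then result ++ [bucket] else result)
    []

-- ===== PRECONDITION & SPEC =====
def Spec_parsing_raw_data (data : List String) (out : List (List String)) : Prop := out = parsing_raw_data_alt data
instance (data : List String) (out : List (List String)) : Decidable (Spec_parsing_raw_data data out) := by unfold Spec_parsing_raw_data; infer_instance

-- ===== CLAIM (what is proved, stated in full; the proofs are below) =====
def Claim_equal_parsing_raw_data : Prop := ∀ (data : List String), Dom_parsing_raw_data data → Spec_parsing_raw_data data (parsing_raw_data data)

-- ===== LEMMAS AND PROOFS =====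

-- A's loop state equals the seven classifier-filters, appended to the incoming accumulators
set_option maxHeartbeats 1000000 in
theorem pvLoopA_eq_filter (xs : List String) : ∀ (r s c u i m t : List String),
    pvLoopA r s c u i m t xs =
      (r ++ xs.filter (fun l => pvClassify pvTags l == some "[READ]"),
       s ++ xs.filter (fun l => pvClassify pvTags l == some "[SCAN]"),
       c ++ xs.filter (fun l => pvClassify pvTags l == some "[CLEANUP]"),
       u ++ xs.filter (fun l => pvClassify pvTags l == some "[UPDATE]"),
       i ++ xs.filter (fun l => pvClassify pvTags l == some "[INSERT]"),
       m ++ xs.filter (fun l => pvClassify pvTags l == some "[READ-MODIFY-WRITE]"),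
       t ++ xs.filter (fun l => pvClassify pvTags l == none)) := by
  induction xs with
  | nil => intro r s c u i m t; simp [pvLoopA]
  | cons x xs ih =>
    intro r s c u i m t
    have hcls : pvClassify pvTags x =
        (if PySem.Str.isIn "[READ]" x then some "[READ]"
         else if PySem.Str.isIn "[CLEANUP]" x then some "[CLEANUP]"
         else if PySem.Str.isIn "[UPDATE]" x then some "[UPDATE]"
         else if PySem.Str.isIn "[INSERT]" x then some "[INSERT]"
         else if PySem.Str.isIn "[SCAN]" x then some "[SCAN]"
         else if PySem.Str.isIn "[READ-MODIFY-WRITE]" x then some "[READ-MODIFY-WRITE]"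
         else none) := by
      simp only [pvClassify, pvTags]
    simp only [pvLoopA]
    split_ifs with h1 h2 h3 h4 h5 h6 <;>
      simp_all [List.append_assoc]

-- ===== VERDICT =====
theorem parsing_raw_data_spec : Claim_equal_parsing_raw_data := by
  intro data _
  unfold Spec_parsing_raw_data parsing_raw_data parsing_raw_data_alt pvOutputOrder
  rw [pvLoopA_eq_filter]
  simp only [List.foldl_cons, List.foldl_nil, List.nil_append, ne_eq, List.length_eq_zero_iff]
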